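-- pv_equiv track=rewrite | github.com/ChristianKaltenecker/PerformanceEvolution_Website | Scripts/research_question_2.py | create_ranking_paths
-- ===== SOURCE A (Python) =====
-- def create_ranking_paths(rankings, max_rank):
--     ranking_dict = {}
--     for ranking in rankings:
--         for i in range(0, len(ranking)):
--             if i not in ranking_dict:
--                 ranking_dict[i] = []
--             if ranking[i] <= max_rank:
--                 ranking_dict[i].append(int(max_rank + 1 - ranking[i]))
--             else:
--                 ranking_dict[i].append(-1)
--
--     # Create the paths
--     paths = {}
--
--     points = []
--     for i in ranking_dict.keys():
--         paths[i] = []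
--         current_path = ([], [])
--         for j in range(0, len(ranking_dict[i])):
--             rank = ranking_dict[i][j]
--             if rank == -1:
--                 if len(current_path[1]) > 0:
--                     paths[i].append(current_path)
--                 current_path = ([], [])
--             else:
--                 points.append((max_rank + 1 - rank, j))
--                 current_path[1].append(rank)
--                 current_path[0].append(len(ranking_dict[i]) - 1 - j)
--
--         if len(current_path[1]) > 0:
--             paths[i].append(current_path)
--     return points, paths
-- ===== SOURCE B (Python) =====
-- def create_ranking_paths(rankings, max_rank):
--     # Column-major rebuild: materialise each column once, then derive points and
--     # run-segmented paths in separate passes over the columns.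
--     n = max([len(r) for r in rankings], default=0)
--     cols = [[max_rank + 1 - r[i] if r[i] <= max_rank else -1
--              for r in rankings if len(r) > i] for i in range(n)]
--
--     points = [(max_rank + 1 - v, j)
--               for col in cols for j, v in enumerate(col) if v != -1]
--
--     paths = {}
--     for i, col in enumerate(cols):
--         paths[i] = [_materialise(col, a, b) for a, b in _segments(col)]
--     return points, paths
--
--
-- def _segments(col):
--     """Maximal runs of non-(-1) entries, as (start, end) index pairs."""
--     segs, start = [], None
--     for j, v in enumerate(col):
--         if v == -1:
--             if start is not None:
--                 segs.append((start, j))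
--             start = None
--         elif start is None:
--             start = j
--     if start is not None:
--         segs.append((start, len(col)))
--     return segs
--
--
-- def _materialise(col, a, b):
--     return ([len(col) - 1 - j for j in range(a, b)], col[a:b])
-- ===== Notes on version B (the rewrite author's own statement) =====
-- stated objective: alternative
-- what changed: Replaces A's row-by-row dict mutation and fused per-column loop (which interleaves point emission, path building and dict appends in one pass with mutable current-path state) by a column-major rebuild: columns are materialised once by comprehension, points come from a separate enumerate/filter pass, and paths are obtained by first computing (start,end) run boundaries per column and then materialising each run from index ranges and slices.
import Mathlib
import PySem

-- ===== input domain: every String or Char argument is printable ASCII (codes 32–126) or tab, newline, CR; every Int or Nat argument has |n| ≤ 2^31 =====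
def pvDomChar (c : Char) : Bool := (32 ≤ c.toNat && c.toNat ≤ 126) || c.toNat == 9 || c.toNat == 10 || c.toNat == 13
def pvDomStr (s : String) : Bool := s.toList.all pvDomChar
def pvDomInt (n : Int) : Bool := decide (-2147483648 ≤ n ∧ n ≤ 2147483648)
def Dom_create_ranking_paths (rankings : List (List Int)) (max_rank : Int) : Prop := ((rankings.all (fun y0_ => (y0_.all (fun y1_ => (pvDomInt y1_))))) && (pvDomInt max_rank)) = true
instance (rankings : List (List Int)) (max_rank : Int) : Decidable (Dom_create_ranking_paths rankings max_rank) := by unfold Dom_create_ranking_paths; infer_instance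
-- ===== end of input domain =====

-- B re-decomposes A's fused dict-mutating loop into a column-major rebuild with separate
-- passes for points and run-segmented paths (objective: alternative, same cost).

-- ===== PORT A =====
-- first loop: for ranking in rankings: for i in range(0, len(ranking)): …
def pvA_dictStep (max_rank : Int) (rd : PySem.Dict Int (List Int)) (ranking : List Int) :
    PySem.Dict Int (List Int) :=
  (PySem.List.pyRange 0 ranking.length 1).foldl (fun rd i =>
    let rd := if rd.contains i then rd else rd.insert i []
    if PySem.List.pyGetD ranking i 0 ≤ max_rank then
      rd.modify i [] (fun l => l ++ [max_rank + 1 - PySem.List.pyGetD ranking i 0])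
    else
      rd.modify i [] (fun l => l ++ [-1])) rd

-- body of A's fused j-loop over one column (state: paths dict, points, current_path)
def pvA_colStep (max_rank : Int) (col : List Int) (i : Int)
    (st : PySem.Dict Int (List (List Int × List Int)) × List (Int × Int) × (List Int × List Int))
    (j : Int) :
    PySem.Dict Int (List (List Int × List Int)) × List (Int × Int) × (List Int × List Int) :=
  let rank := PySem.List.pyGetD col j 0
  if rank = -1 then
    (if st.2.2.2.length > 0 then st.1.modify i [] (fun l => l ++ [st.2.2]) else st.1,
     st.2.1, ([], []))
  else
    (st.1, st.2.1 ++ [(max_rank + 1 - rank, j)],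
     (st.2.2.1 ++ [(col.length : Int) - 1 - j], st.2.2.2 ++ [rank]))

-- one iteration of A's outer loop over ranking_dict.keys()
def pvA_colLoop (max_rank : Int) (col : List Int) (i : Int)
    (st : PySem.Dict Int (List (List Int × List Int)) × List (Int × Int)) :
    PySem.Dict Int (List (List Int × List Int)) × List (Int × Int) :=
  let r := (PySem.List.pyRange 0 col.length 1).foldl (pvA_colStep max_rank col i)
      (st.1.insert i [], st.2, ([], []))
  (if r.2.2.2.length > 0 then r.1.modify i [] (fun l => l ++ [r.2.2]) else r.1, r.2.1)

def create_ranking_paths (rankings : List (List Int)) (max_rank : Int) :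
    (List (Int × Int)) × (List (Int × List (List Int × List Int))) :=
  let ranking_dict := rankings.foldl (pvA_dictStep max_rank) PySem.Dict.empty
  let r := ranking_dict.keys.foldl
      (fun st i => pvA_colLoop max_rank (ranking_dict.getD i []) i st)
      (PySem.Dict.empty, [])
  (r.2, r.1.items)

-- ===== PORT B =====
-- body of _segments' scan (state: segs, start)
def pvSegStep (st : List (Int × Int) × Option Int) (jv : Int × Int) :
    List (Int × Int) × Option Int :=
  if jv.2 = -1 then
    (match st.2 with
     | some a => st.1 ++ [(a, jv.1)]
     | none => st.1, none)
  else
    match st.2 with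
    | none => (st.1, some jv.1)
    | some _ => st

-- _segments(col): maximal runs of non-(-1) entries as (start, end) pairs
def pvSegments (col : List Int) : List (Int × Int) :=
  let st := (PySem.List.enumerate col).foldl pvSegStep ([], none)
  match st.2 with
  | some a => st.1 ++ [(a, (col.length : Int))]
  | none => st.1

-- one column of the transpose, by comprehension
def pvColumn (rankings : List (List Int)) (max_rank : Int) (i : Nat) : List Int :=
  (rankings.filter (fun r => decide (i < r.length))).map
    (fun r => if r.getD i 0 ≤ max_rank then max_rank + 1 - r.getD i 0 else -1)

-- _materialise(col, a, b)
def pvMaterialise (col : List Int) (ab : Int × Int) : List Int × List Int :=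
  ((PySem.List.pyRange ab.1 ab.2 1).map (fun j => (col.length : Int) - 1 - j),
   PySem.List.slice col (some ab.1) (some ab.2))

def create_ranking_paths_alt (rankings : List (List Int)) (max_rank : Int) :
    (List (Int × Int)) × (List (Int × List (List Int × List Int))) :=
  let n : Nat := PySem.List.maxD (rankings.map (fun r => r.length)) id 0
  let cols := (List.range n).map (pvColumn rankings max_rank)
  let points := cols.flatMap (fun col =>
    ((PySem.List.enumerate col).filter (fun jv => jv.2 != -1)).map
      (fun jv => (max_rank + 1 - jv.2, jv.1)))
  let paths := (PySem.List.enumerate cols).foldl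
    (fun (d : PySem.Dict Int (List (List Int × List Int))) ic =>
      d.insert ic.1 ((pvSegments ic.2).map (pvMaterialise ic.2)))
    PySem.Dict.empty
  (points, paths.items)

-- ===== PRECONDITION & SPEC =====
def Spec_create_ranking_paths (rankings : List (List Int)) (max_rank : Int) (out : (List (Int × Int)) × (List (Int × List (List Int × List Int)))) : Prop := out = create_ranking_paths_alt rankings max_rank
instance (rankings : List (List Int)) (max_rank : Int) (out : (List (Int × Int)) × (List (Int × List (List Int × List Int)))) : Decidable (Spec_create_ranking_paths rankings max_rank out) := by unfold Spec_create_ranking_paths; infer_instance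

-- ===== CLAIM (what is proved, stated in full; the proofs are below) =====
def Claim_equal_create_ranking_paths : Prop := ∀ (rankings : List (List Int)) (max_rank : Int), Dom_create_ranking_paths rankings max_rank → Spec_create_ranking_paths rankings max_rank (create_ranking_paths rankings max_rank)

-- ===== LEMMAS AND PROOFS =====

-- the transformed entry written into a column
def pvTr (max_rank v : Int) : Int := if v ≤ max_rank then max_rank + 1 - v else -1

-- number of columns
def pvM (rankings : List (List Int)) : Nat := rankings.foldl (fun m r => max m r.length) 0

-- a dict whose keys are 0,…,N-1 in order
def pvMkRange {ν : Type} (N : Nat) (w : Nat → ν) : PySem.Dict Int ν :=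
  PySem.Dict.mk ((List.range N).map (fun i : Nat => ((i : Int), w i)))

-- reference recursion for A's fused column loop: closed path contents
def pvF (max_rank L : Int) : List Int → Nat → (List Int × List Int) → List (List Int × List Int)
  | [], _, cur => if cur.2.length > 0 then [cur] else []
  | v :: t, s, cur =>
    if v = -1 then
      if cur.2.length > 0 then cur :: pvF max_rank L t (s + 1) ([], [])
      else pvF max_rank L t (s + 1) ([], [])
    else pvF max_rank L t (s + 1) (cur.1 ++ [L - 1 - (s : Int)], cur.2 ++ [v])

-- reference recursion for the points emitted from one column
def pvP (max_rank : Int) : List Int → Nat → List (Int × Int)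
  | [], _ => []
  | v :: t, s =>
    if v = -1 then pvP max_rank t (s + 1)
    else (max_rank + 1 - v, (s : Int)) :: pvP max_rank t (s + 1)

-- reference recursion for B's run boundaries
mutual
def pvG : List Int → Nat → List (Int × Int)
  | [], _ => []
  | v :: t, s => if v = -1 then pvG t (s + 1) else pvGopen t (s + 1) s
def pvGopen : List Int → Nat → Nat → List (Int × Int)
  | [], s, a => [((a : Int), (s : Int))]
  | v :: t, s, a => if v = -1 then ((a : Int), (s : Int)) :: pvG t (s + 1) else pvGopen t (s + 1) a
end

-- the materialised content of the currently open run [a, s)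
def pvOpen (col : List Int) (a s : Nat) : List Int × List Int :=
  ((PySem.List.pyRange (a : Int) (s : Int) 1).map (fun j => (col.length : Int) - 1 - j),
   (col.drop a).take (s - a))

-- pvA_colStep as a function of an (index, value) pair
def pvGA (max_rank L i : Int)
    (st : PySem.Dict Int (List (List Int × List Int)) × List (Int × Int) × (List Int × List Int))
    (p : Int × Int) :
    PySem.Dict Int (List (List Int × List Int)) × List (Int × Int) × (List Int × List Int) :=
  if p.2 = -1 then
    (if st.2.2.2.length > 0 then st.1.modify i [] (fun l => l ++ [st.2.2]) else st.1,
     st.2.1, ([], []))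
  else
    (st.1, st.2.1 ++ [(max_rank + 1 - p.2, p.1)],
     (st.2.2.1 ++ [L - 1 - p.1], st.2.2.2 ++ [p.2]))

-- closing step after A's fused loop / B's scan
def pvCloseA (i : Int)
    (r : PySem.Dict Int (List (List Int × List Int)) × List (Int × Int) × (List Int × List Int)) :
    PySem.Dict Int (List (List Int × List Int)) × List (Int × Int) :=
  (if r.2.2.2.length > 0 then r.1.modify i [] (fun l => l ++ [r.2.2]) else r.1, r.2.1)

def pvCloseB (e : Int) (st : List (Int × Int) × Option Int) : List (Int × Int) :=
  match st.2 with
  | some a => st.1 ++ [(a, e)]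
  | none => st.1

-- ---- dict helpers on pvMkRange ----
lemma pvMkRange_keys {ν : Type} (N : Nat) (w : Nat → ν) :
    (pvMkRange N w).keys = (List.range N).map (fun i : Nat => ((i : Int))) := by
  simp [pvMkRange, PySem.Dict.keys, List.map_map, Function.comp]

lemma pvMkRange_nodup_keys {ν : Type} (N : Nat) (w : Nat → ν) :
    (pvMkRange N w).keys.Nodup := by
  rw [pvMkRange_keys]
  exact List.Nodup.map Nat.cast_injective (List.nodup_range)

lemma pvMkRange_contains {ν : Type} (N k : Nat) (w : Nat → ν) :
    (pvMkRange N w).contains ((k : Nat) : Int) = decide (k < N) := by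
  rw [PySem.Dict.contains_eq_decide_mem_keys, pvMkRange_keys, decide_eq_decide]
  simp [List.mem_map, List.mem_range]

lemma pvMkRange_get? {ν : Type} (N k : Nat) (w : Nat → ν) :
    (pvMkRange N w).get? ((k : Nat) : Int) = if k < N then some (w k) else none := by
  by_cases h : k < N
  · have hm : (((k : Nat) : Int), w k) ∈ (pvMkRange N w).items := by
      simp only [pvMkRange]
      exact List.mem_map.mpr ⟨k, List.mem_range.mpr h, rfl⟩
    rw [PySem.Dict.get?_of_mem_items _ hm (pvMkRange_nodup_keys N w), if_pos h]
  · rw [if_neg h, PySem.Dict.get?_eq_none_iff_not_mem_keys, pvMkRange_keys]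
    intro hmem
    rcases List.mem_map.mp hmem with ⟨j, hj, he⟩
    exact h (by rw [← Int.natCast_inj.mp he]; exact List.mem_range.mp hj)

lemma pvMkRange_getD {ν : Type} (N k : Nat) (w : Nat → ν) (d : ν) :
    (pvMkRange N w).getD ((k : Nat) : Int) d = if k < N then w k else d := by
  rw [PySem.Dict.getD_eq_get?_getD, pvMkRange_get?]
  by_cases h : k < N <;> simp [h]

lemma pvMkRange_insert_lt {ν : Type} (N k : Nat) (hk : k < N) (w : Nat → ν) (val : ν) :
    (pvMkRange N w).insert ((k : Nat) : Int) val
      = pvMkRange N (fun i => if i = k then val else w i) := by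
  have hc : (pvMkRange N w).contains ((k : Nat) : Int) = true := by
    rw [pvMkRange_contains]; simp [hk]
  apply PySem.Dict.ext
  rw [PySem.Dict.items_insert_of_contains _ _ hc]
  simp only [pvMkRange, List.map_map]
  apply List.map_congr_left
  intro i hi
  by_cases hik : i = k
  · subst hik; simp
  · simp [Function.comp, hik]

lemma pvMkRange_insert_eq {ν : Type} (N : Nat) (w : Nat → ν) (val : ν) :
    (pvMkRange N w).insert ((N : Nat) : Int) val
      = pvMkRange (N + 1) (fun i => if i = N then val else w i) := by
  have hc : (pvMkRange N w).contains ((N : Nat) : Int) = false := by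
    rw [pvMkRange_contains]; simp
  apply PySem.Dict.ext
  rw [PySem.Dict.items_insert_of_not_contains _ _ hc]
  simp only [pvMkRange, List.range_succ, List.map_append, List.map_cons, List.map_nil]
  congr 1
  apply List.map_congr_left
  intro i hi
  have hne : i ≠ N := by have := List.mem_range.mp hi; omega
  simp [hne]

lemma pvMkRange_congr {ν : Type} (N : Nat) (w w' : Nat → ν) (h : ∀ i < N, w i = w' i) :
    pvMkRange N w = pvMkRange N w' := by
  apply PySem.Dict.ext
  simp only [pvMkRange]
  apply List.map_congr_left
  intro i hi
  rw [h i (List.mem_range.mp hi)]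

lemma pvEmpty_eq_mkRange {ν : Type} (w : Nat → ν) :
    (PySem.Dict.empty : PySem.Dict Int ν) = pvMkRange 0 w := rfl

-- ---- dict helpers on a keyed append ----
lemma pvKeyed_contains {ν : Type} (base : List (Int × ν)) (i : Int) (x : ν) :
    (PySem.Dict.mk (base ++ [(i, x)])).contains i = true := by
  simp [PySem.Dict.contains, List.any_append]

lemma pvKeyed_getD {ν : Type} (base : List (Int × ν)) (i : Int) (x : ν) (d : ν)
    (hb : ∀ p ∈ base, (p.1 == i) = false) :
    (PySem.Dict.mk (base ++ [(i, x)])).getD i d = x := by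
  have h1 : base.find? (fun p => p.1 == i) = none :=
    List.find?_eq_none.mpr (fun p hp => by simp [hb p hp])
  simp [PySem.Dict.getD, PySem.Dict.get?, List.find?_append, h1]

lemma pvKeyed_modify {ν : Type} (base : List (Int × ν)) (i : Int) (x d : ν) (f : ν → ν)
    (hb : ∀ p ∈ base, (p.1 == i) = false) :
    (PySem.Dict.mk (base ++ [(i, x)])).modify i d f = PySem.Dict.mk (base ++ [(i, f x)]) := by
  have hc := pvKeyed_contains base i x
  have hg := pvKeyed_getD base i x d hb
  simp only [PySem.Dict.modify, hg]
  apply PySem.Dict.ext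
  rw [PySem.Dict.items_insert_of_contains _ _ hc]
  simp only [List.map_append]
  congr 1
  · have h1 : List.map (fun p => if (p.1 == i) = true then (i, f x) else p) base
        = List.map id base :=
      List.map_congr_left (fun p hp => by simp [hb p hp])
    rw [h1, List.map_id]
  · simp

-- transformed-value bridges
lemma pvTr_pos {max_rank v : Int} (h : v ≤ max_rank) :
    max_rank + 1 - v = pvTr max_rank v := by simp [pvTr, h]

lemma pvTr_neg {max_rank v : Int} (h : ¬ v ≤ max_rank) :
    (-1 : Int) = pvTr max_rank v := by simp [pvTr, h]

-- ---- phase 1: the ranking_dict is the list of columns ----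
lemma pvA_dictStep_spec (max_rank : Int) (r : List Int) (m : Nat) (w : Nat → List Int) :
    pvA_dictStep max_rank (pvMkRange m w) r
      = pvMkRange (max m r.length) (fun i =>
          (if i < m then w i else []) ++
          (if i < r.length then [pvTr max_rank (r.getD i 0)] else [])) := by
  unfold pvA_dictStep
  have main : ∀ k : Nat, k ≤ r.length →
      (PySem.List.pyRange 0 ((k : Nat) : Int) 1).foldl (fun rd i =>
        let rd := if rd.contains i then rd else rd.insert i []
        if PySem.List.pyGetD r i 0 ≤ max_rank then
          rd.modify i [] (fun l => l ++ [max_rank + 1 - PySem.List.pyGetD r i 0])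
        else
          rd.modify i [] (fun l => l ++ [-1])) (pvMkRange m w)
      = pvMkRange (max m k) (fun i =>
          (if i < m then w i else []) ++
          (if i < k then [pvTr max_rank (r.getD i 0)] else [])) := by
    intro k
    induction k with
    | zero =>
      intro _
      rw [show ((0 : Nat) : Int) = 0 from rfl, PySem.List.pyRange_one_eq_nil (le_refl 0)]
      simp only [List.foldl_nil, Nat.max_zero]
      apply pvMkRange_congr
      intro i hi
      simp [hi]
    | succ k ih =>
      intro hk
      have hk' : k ≤ r.length := Nat.le_of_succ_le hk
      have hcast : ((k + 1 : Nat) : Int) = ((k : Nat) : Int) + 1 := by push_cast; ring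
      rw [hcast, PySem.List.pyRange_one_succ_right (by positivity), List.foldl_append,
        List.foldl_cons, List.foldl_nil, ih hk']
      simp only
      have hget : PySem.List.pyGetD r ((k : Nat) : Int) 0 = r.getD k 0 := by
        simp [PySem.List.pyGetD_natCast]
      by_cases hm : k < m
      · have hc : (pvMkRange (max m k) (fun i =>
            (if i < m then w i else []) ++
            (if i < k then [pvTr max_rank (r.getD i 0)] else []))).contains ((k : Nat) : Int) = true := by
          rw [pvMkRange_contains]; simp; omega
        have hkmax : k < max m k := by omega
        have hmax : max m k = max m (k + 1) := by omega
        rw [if_pos hc]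
        simp only [PySem.Dict.modify, hget]
        rw [pvMkRange_getD, if_pos hkmax, if_pos hm, if_neg (Nat.lt_irrefl k)]
        split_ifs with hle
        · rw [pvTr_pos hle, pvMkRange_insert_lt _ _ hkmax, hmax]
          apply pvMkRange_congr
          intro i hi
          by_cases hik : i = k
          · subst hik; simp [hm]
          · have hiff : (i < k) ↔ (i < k + 1) := by omega
            simp [hik, hiff]
        · rw [pvTr_neg hle, pvMkRange_insert_lt _ _ hkmax, hmax]
          apply pvMkRange_congr
          intro i hi
          by_cases hik : i = k
          · subst hik; simp [hm]
          · have hiff : (i < k) ↔ (i < k + 1) := by omega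
            simp [hik, hiff]
      · have hc : (pvMkRange (max m k) (fun i =>
            (if i < m then w i else []) ++
            (if i < k then [pvTr max_rank (r.getD i 0)] else []))).contains ((k : Nat) : Int) = false := by
          rw [pvMkRange_contains]; simp; omega
        have hmk : max m k = k := by omega
        rw [hc]
        simp only [Bool.false_eq_true, if_false]
        rw [hmk, pvMkRange_insert_eq]
        simp only [PySem.Dict.modify, hget]
        rw [pvMkRange_getD, if_pos (Nat.lt_succ_self k), if_pos rfl]
        split_ifs with hle
        · rw [pvTr_pos hle, pvMkRange_insert_lt _ _ (Nat.lt_succ_self k)]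
          rw [show max m (k + 1) = k + 1 from by omega]
          apply pvMkRange_congr
          intro i hi
          by_cases hik : i = k
          · subst hik; simp [hm]
          · have hiff : (i < k) ↔ (i < k + 1) := by omega
            simp [hik, hiff]
        · rw [pvTr_neg hle, pvMkRange_insert_lt _ _ (Nat.lt_succ_self k)]
          rw [show max m (k + 1) = k + 1 from by omega]
          apply pvMkRange_congr
          intro i hi
          by_cases hik : i = k
          · subst hik; simp [hm]
          · have hiff : (i < k) ↔ (i < k + 1) := by omega
            simp [hik, hiff]
  exact main r.length (le_refl _)

lemma pvColumn_cons (r : List Int) (rs : List (List Int)) (max_rank : Int) (i : Nat) :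
    pvColumn (r :: rs) max_rank i
      = (if i < r.length then [pvTr max_rank (r.getD i 0)] else []) ++ pvColumn rs max_rank i := by
  simp only [pvColumn, List.filter_cons]
  by_cases h : i < r.length
  · simp [h, pvTr]
  · simp [h]

lemma pvA_dict_gen (max_rank : Int) :
    ∀ (rs : List (List Int)) (m : Nat) (w : Nat → List Int),
      rs.foldl (pvA_dictStep max_rank) (pvMkRange m w)
        = pvMkRange (rs.foldl (fun m r => max m r.length) m)
            (fun i => (if i < m then w i else []) ++ pvColumn rs max_rank i) := by
  intro rs
  induction rs with
  | nil =>
    intro m w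
    simp only [List.foldl_nil]
    apply pvMkRange_congr
    intro i hi
    simp [pvColumn, hi]
  | cons r rs ih =>
    intro m w
    simp only [List.foldl_cons]
    rw [pvA_dictStep_spec, ih]
    apply pvMkRange_congr
    intro i hi
    rw [pvColumn_cons]
    by_cases h1 : i < max m r.length
    · simp only [if_pos h1]
      by_cases h2 : i < m
      · simp [h2, List.append_assoc]
      · simp [h2]
    · have h2 : ¬ i < m := by omega
      have h3 : ¬ i < r.length := by omega
      simp [h1, h2, h3]

lemma pvA_dict_spec (max_rank : Int) (rs : List (List Int)) :
    rs.foldl (pvA_dictStep max_rank) PySem.Dict.empty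
      = pvMkRange (pvM rs) (pvColumn rs max_rank) := by
  rw [pvEmpty_eq_mkRange (fun _ => ([] : List Int)), pvA_dict_gen]
  apply pvMkRange_congr
  intro i hi
  simp

-- ---- phase 2, A side ----
lemma pvA_colStep_eq_pvGA (max_rank : Int) (col : List Int) (i : Int)
    (st : PySem.Dict Int (List (List Int × List Int)) × List (Int × Int) × (List Int × List Int))
    (j : Int) :
    pvA_colStep max_rank col i st j
      = pvGA max_rank (col.length : Int) i st (j, PySem.List.pyGetD col j 0) := rfl

lemma pvA_loop (max_rank L : Int) (i : Int)
    (base : List (Int × List (List Int × List Int)))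
    (hb : ∀ p ∈ base, (p.1 == i) = false) :
    ∀ (t : List Int) (s : Nat) (acc : List (List Int × List Int)) (pts : List (Int × Int))
      (cur : List Int × List Int),
      pvCloseA i ((PySem.List.enumerate t ((s : Nat) : Int)).foldl (pvGA max_rank L i)
          (PySem.Dict.mk (base ++ [(i, acc)]), pts, cur))
        = (PySem.Dict.mk (base ++ [(i, acc ++ pvF max_rank L t s cur)]), pts ++ pvP max_rank t s) := by
  intro t
  induction t with
  | nil =>
    intro s acc pts cur
    simp only [PySem.List.enumerate_nil, List.foldl_nil, pvCloseA, pvF, pvP]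
    by_cases h : cur.2.length > 0
    · rw [if_pos h, if_pos h, pvKeyed_modify _ _ _ _ _ hb]
      simp
    · rw [if_neg h, if_neg h]
      simp
  | cons v t ih =>
    intro s acc pts cur
    rw [PySem.List.enumerate_cons]
    simp only [List.foldl_cons]
    by_cases hv : v = -1
    · by_cases hc : cur.2.length > 0
      · have hstep : pvGA max_rank L i (PySem.Dict.mk (base ++ [(i, acc)]), pts, cur) (((s : Nat) : Int), v)
            = (PySem.Dict.mk (base ++ [(i, acc ++ [cur])]), pts, ([], [])) := by
          simp [pvGA, hv, hc]
          rw [pvKeyed_modify _ _ _ _ _ hb]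
        rw [hstep, show ((s : Nat) : Int) + 1 = (((s + 1 : Nat) : Nat) : Int) from by push_cast; ring,
          ih (s + 1) (acc ++ [cur]) pts ([], [])]
        simp [pvF, pvP, hv, hc, List.append_assoc]
      · have hstep : pvGA max_rank L i (PySem.Dict.mk (base ++ [(i, acc)]), pts, cur) (((s : Nat) : Int), v)
            = (PySem.Dict.mk (base ++ [(i, acc)]), pts, ([], [])) := by
          simp [pvGA, hv, hc]
        rw [hstep, show ((s : Nat) : Int) + 1 = (((s + 1 : Nat) : Nat) : Int) from by push_cast; ring,
          ih (s + 1) acc pts ([], [])]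
        simp [pvF, pvP, hv, hc]
    · have hstep : pvGA max_rank L i (PySem.Dict.mk (base ++ [(i, acc)]), pts, cur) (((s : Nat) : Int), v)
          = (PySem.Dict.mk (base ++ [(i, acc)]), pts ++ [(max_rank + 1 - v, ((s : Nat) : Int))],
             (cur.1 ++ [L - 1 - ((s : Nat) : Int)], cur.2 ++ [v])) := by
        simp [pvGA, hv]
      rw [hstep, show ((s : Nat) : Int) + 1 = (((s + 1 : Nat) : Nat) : Int) from by push_cast; ring,
        ih (s + 1) acc (pts ++ [(max_rank + 1 - v, ((s : Nat) : Int))]) (cur.1 ++ [L - 1 - ((s : Nat) : Int)], cur.2 ++ [v])]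
      simp [pvF, pvP, hv, List.append_assoc]

lemma pvA_colLoop_spec (max_rank : Int) (col : List Int) (i : Int)
    (items0 : List (Int × List (List Int × List Int))) (pts : List (Int × Int))
    (hb : ∀ p ∈ items0, (p.1 == i) = false) :
    pvA_colLoop max_rank col i (PySem.Dict.mk items0, pts)
      = (PySem.Dict.mk (items0 ++ [(i, pvF max_rank (col.length : Int) col 0 ([], []))]),
         pts ++ pvP max_rank col 0) := by
  have hins : (PySem.Dict.mk items0).insert i [] = PySem.Dict.mk (items0 ++ [(i, [])]) := by
    apply PySem.Dict.ext
    rw [PySem.Dict.items_insert_of_not_contains]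
    simp only [PySem.Dict.contains]
    rw [List.any_eq_false]
    intro p hp
    simp [hb p hp]
  have hfun : pvA_colStep max_rank col i
      = fun st j => pvGA max_rank (col.length : Int) i st (j, PySem.List.pyGetD col j 0) :=
    funext fun st => funext fun j => pvA_colStep_eq_pvGA max_rank col i st j
  have henum : PySem.List.enumerate col 0
      = (PySem.List.pyRange 0 (col.length : Int) 1).map (fun j => (j, PySem.List.pyGetD col j 0)) := by
    rw [PySem.List.enumerate_eq_map_pyRange col 0]
    simp [PySem.List.len_eq]
  have key := pvA_loop max_rank (col.length : Int) i items0 hb col 0 [] pts ([], [])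
  simp only [Nat.cast_zero] at key
  rw [henum, List.foldl_map] at key
  show pvCloseA i ((PySem.List.pyRange 0 (col.length : Int) 1).foldl (pvA_colStep max_rank col i)
      ((PySem.Dict.mk items0).insert i [], pts, ([], []))) = _
  rw [hins, hfun, key]
  simp

lemma pvA_outer (max_rank : Int) (rd : PySem.Dict Int (List Int)) :
    ∀ (ks : List Nat) (items0 : List (Int × List (List Int × List Int))) (pts : List (Int × Int)),
      ks.Nodup →
      (∀ k ∈ ks, ∀ p ∈ items0, (p.1 == ((k : Nat) : Int)) = false) →
      (ks.map (fun k : Nat => ((k : Nat) : Int))).foldl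
          (fun st i => pvA_colLoop max_rank (rd.getD i []) i st) (PySem.Dict.mk items0, pts)
        = (PySem.Dict.mk (items0 ++ ks.map (fun k =>
              (((k : Nat) : Int),
               pvF max_rank ((rd.getD ((k : Nat) : Int) []).length : Int) (rd.getD ((k : Nat) : Int) []) 0 ([], [])))),
           pts ++ (ks.map (fun k => pvP max_rank (rd.getD ((k : Nat) : Int) []) 0)).flatten) := by
  intro ks
  induction ks with
  | nil =>
    intro items0 pts _ _
    simp
  | cons k ks ih =>
    intro items0 pts hnd hfresh
    simp only [List.map_cons, List.foldl_cons]
    rw [pvA_colLoop_spec _ _ _ _ _ (hfresh k (List.mem_cons_self ..))]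
    rw [ih (items0 ++ [(((k : Nat) : Int), pvF max_rank ((rd.getD ((k : Nat) : Int) []).length : Int) (rd.getD ((k : Nat) : Int) []) 0 ([], []))]) _ (List.Nodup.of_cons hnd) ?_]
    · simp [List.append_assoc]
    · intro k' hk' p hp
      rcases List.mem_append.mp hp with hp0 | hp1
      · exact hfresh k' (List.mem_cons_of_mem _ hk') p hp0
      · have hpk : p = (((k : Nat) : Int), pvF max_rank ((rd.getD ((k : Nat) : Int) []).length : Int) (rd.getD ((k : Nat) : Int) []) 0 ([], [])) := by
          simpa using hp1
        have hne : k ≠ k' := by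
          intro h
          subst h
          exact (List.nodup_cons.mp hnd).1 hk'
        rw [hpk]
        simp
        omega

-- ---- phase 2, B side ----
lemma pvMaxD_eq_pvM (rs : List (List Int)) :
    PySem.List.maxD (rs.map (fun r => r.length)) id 0 = pvM rs := by
  have hstep2 : ∀ (m x : Nat) (t : List Nat),
      PySem.List.max? (m :: x :: t) id = PySem.List.max? (max m x :: t) id := by
    intro m x t
    by_cases hmx : m < x
    · simp [PySem.List.max?, hmx, Nat.max_eq_right hmx.le]
    · simp [PySem.List.max?, hmx, Nat.max_eq_left (Nat.le_of_not_lt hmx)]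
  have hsome : ∀ (l : List Nat) (m : Nat),
      PySem.List.max? (m :: l) id = some (l.foldl max m) := by
    intro l
    induction l with
    | nil => intro m; rfl
    | cons x t ih =>
      intro m
      rw [hstep2 m x t, ih (max m x), List.foldl_cons]
  have hM : pvM rs = (rs.map (fun r => r.length)).foldl max 0 := by
    unfold pvM
    rw [List.foldl_map]
  rw [hM]
  cases hrs : rs.map (fun r => r.length) with
  | nil => simp [PySem.List.maxD, PySem.List.max?]
  | cons x t =>
    rw [List.foldl_cons]
    simp [PySem.List.maxD, hsome t x]

lemma pvB_loop :
    ∀ (t : List Int) (s : Nat) (segs : List (Int × Int)),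
      (pvCloseB (((s + t.length : Nat)) : Int)
          ((PySem.List.enumerate t ((s : Nat) : Int)).foldl pvSegStep (segs, none))
        = segs ++ pvG t s)
      ∧ (∀ a : Nat,
          pvCloseB (((s + t.length : Nat)) : Int)
              ((PySem.List.enumerate t ((s : Nat) : Int)).foldl pvSegStep (segs, some ((a : Nat) : Int)))
            = segs ++ pvGopen t s a) := by
  intro t
  induction t with
  | nil =>
    intro s segs
    constructor
    · simp [PySem.List.enumerate_nil, pvCloseB, pvG]
    · intro a
      simp [PySem.List.enumerate_nil, pvCloseB, pvGopen]
  | cons v t ih =>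
    intro s segs
    have hcast : ((s : Nat) : Int) + 1 = (((s + 1 : Nat)) : Int) := by push_cast; ring
    have hlen : (s + (v :: t).length : Nat) = ((s + 1) + t.length : Nat) := by simp; omega
    constructor
    · rw [PySem.List.enumerate_cons]
      simp only [List.foldl_cons]
      by_cases hv : v = -1
      · have hstep : pvSegStep (segs, none) (((s : Nat) : Int), v) = (segs, none) := by
          simp [pvSegStep, hv]
        rw [hstep, hcast, hlen, (ih (s + 1) segs).1]
        simp [pvG, hv]
      · have hstep : pvSegStep (segs, none) (((s : Nat) : Int), v) = (segs, some ((s : Nat) : Int)) := by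
          simp [pvSegStep, hv]
        rw [hstep, hcast, hlen, (ih (s + 1) segs).2 s]
        simp [pvG, hv]
    · intro a
      rw [PySem.List.enumerate_cons]
      simp only [List.foldl_cons]
      by_cases hv : v = -1
      · have hstep : pvSegStep (segs, some ((a : Nat) : Int)) (((s : Nat) : Int), v)
            = (segs ++ [(((a : Nat) : Int), ((s : Nat) : Int))], none) := by
          simp [pvSegStep, hv]
        rw [hstep, hcast, hlen, (ih (s + 1) (segs ++ [(((a : Nat) : Int), ((s : Nat) : Int))])).1]
        simp [pvGopen, hv]
      · have hstep : pvSegStep (segs, some ((a : Nat) : Int)) (((s : Nat) : Int), v)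
            = (segs, some ((a : Nat) : Int)) := by
          simp [pvSegStep, hv]
        rw [hstep, hcast, hlen, (ih (s + 1) segs).2 a]
        simp [pvGopen, hv]

lemma pvSegments_eq_pvG (col : List Int) : pvSegments col = pvG col 0 := by
  have h := (pvB_loop col 0 []).1
  simp only [Nat.zero_add, Nat.cast_zero] at h
  unfold pvSegments
  simpa [pvCloseB] using h

lemma pvPoints_col (max_rank : Int) :
    ∀ (t : List Int) (s : Nat),
      ((PySem.List.enumerate t ((s : Nat) : Int)).filter (fun jv => jv.2 != -1)).map
          (fun jv => (max_rank + 1 - jv.2, jv.1))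
        = pvP max_rank t s := by
  intro t
  induction t with
  | nil => intro s; simp [PySem.List.enumerate_nil, pvP]
  | cons v t ih =>
    intro s
    rw [PySem.List.enumerate_cons]
    have ih' := ih (s + 1)
    push_cast at ih'
    by_cases hv : v = -1
    · subst hv
      simp [pvP, ih']
    · simp [pvP, hv, ih']

-- ---- the crux: materialised runs are A's path contents ----
lemma pvMat_eq_pvOpen (col : List Int) (a b : Nat) :
    pvMaterialise col ((a : Int), (b : Int)) = pvOpen col a b := by
  simp [pvMaterialise, pvOpen, PySem.List.slice_natCast]

lemma pvCrux (max_rank : Int) :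
    ∀ (t pre col : List Int), col = pre ++ t →
      ((pvG t pre.length).map (pvMaterialise col)
          = pvF max_rank (col.length : Int) t pre.length ([], []))
      ∧ (∀ a : Nat, a < pre.length →
          (pvGopen t pre.length a).map (pvMaterialise col)
            = pvF max_rank (col.length : Int) t pre.length (pvOpen col a pre.length)) := by
  intro t
  induction t with
  | nil =>
    intro pre col h
    constructor
    · simp [pvG, pvF]
    · intro a ha
      have hlen : col.length = pre.length := by rw [h]; simp
      simp only [pvGopen, List.map_cons, List.map_nil, pvMat_eq_pvOpen, pvF]
      rw [if_pos]
      simp only [pvOpen, List.length_take, List.length_drop, hlen]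
      omega
  | cons v t ih =>
    intro pre col h
    have hlen : col.length = pre.length + (t.length + 1) := by simp [h]
    have hdrop : List.drop pre.length col = v :: t := by
      rw [h, List.drop_append_of_le_length (le_refl _)]
      simp
    have hlenpre : (pre ++ [v]).length = pre.length + 1 := by simp
    constructor
    · by_cases hv : v = -1
      · subst hv
        have h2 := (ih (pre ++ [(-1 : Int)]) col (by rw [h]; simp)).1
        rw [hlenpre] at h2
        have hG : pvG ((-1 : Int) :: t) pre.length = pvG t (pre.length + 1) := by simp [pvG]
        have hF : pvF max_rank (col.length : Int) ((-1 : Int) :: t) pre.length ([], [])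
            = pvF max_rank (col.length : Int) t (pre.length + 1) ([], []) := by simp [pvF]
        rw [hG, hF]
        exact h2
      · have h2 := (ih (pre ++ [v]) col (by rw [h]; simp)).2 pre.length (by simp)
        rw [hlenpre] at h2
        have hopen : pvOpen col pre.length (pre.length + 1)
            = ([(col.length : Int) - 1 - (pre.length : Int)], [v]) := by
          simp only [pvOpen, Prod.mk.injEq]
          constructor
          · rw [show ((pre.length + 1 : Nat) : Int) = (pre.length : Int) + 1 from by push_cast; ring,
              PySem.List.pyRange_one_singleton]
            simp
          · rw [hdrop]
            simp
        have hG : pvG (v :: t) pre.length = pvGopen t (pre.length + 1) pre.length := by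
          simp [pvG, hv]
        have hF : pvF max_rank (col.length : Int) (v :: t) pre.length ([], [])
            = pvF max_rank (col.length : Int) t (pre.length + 1)
                ([(col.length : Int) - 1 - (pre.length : Int)], [v]) := by
          simp [pvF, hv]
        rw [hG, hF, h2, hopen]
    · intro a ha
      by_cases hv : v = -1
      · subst hv
        have h2 := (ih (pre ++ [(-1 : Int)]) col (by rw [h]; simp)).1
        rw [hlenpre] at h2
        have hcond : (pvOpen col a pre.length).2.length > 0 := by
          simp only [pvOpen, List.length_take, List.length_drop]
          omega
        have hGo : pvGopen ((-1 : Int) :: t) pre.length a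
            = (((a : Nat) : Int), ((pre.length : Nat) : Int)) :: pvG t (pre.length + 1) := by
          simp [pvGopen]
        have hF : pvF max_rank (col.length : Int) ((-1 : Int) :: t) pre.length (pvOpen col a pre.length)
            = pvOpen col a pre.length :: pvF max_rank (col.length : Int) t (pre.length + 1) ([], []) := by
          simp [pvF, hcond]
        rw [hGo, hF, List.map_cons, pvMat_eq_pvOpen, h2]
      · have h2 := (ih (pre ++ [v]) col (by rw [h]; simp)).2 a (by simp; omega)
        rw [hlenpre] at h2
        have hGo : pvGopen (v :: t) pre.length a = pvGopen t (pre.length + 1) a := by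
          simp [pvGopen, hv]
        have hF : pvF max_rank (col.length : Int) (v :: t) pre.length (pvOpen col a pre.length)
            = pvF max_rank (col.length : Int) t (pre.length + 1)
                ((pvOpen col a pre.length).1 ++ [(col.length : Int) - 1 - (pre.length : Int)],
                 (pvOpen col a pre.length).2 ++ [v]) := by
          simp [pvF, hv]
        have hext : pvOpen col a (pre.length + 1)
            = ((pvOpen col a pre.length).1 ++ [(col.length : Int) - 1 - (pre.length : Int)],
               (pvOpen col a pre.length).2 ++ [v]) := by
          simp only [pvOpen, Prod.mk.injEq]
          constructor
          · rw [show ((pre.length + 1 : Nat) : Int) = (pre.length : Int) + 1 from by push_cast; ring,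
              PySem.List.pyRange_one_succ_right (by exact_mod_cast ha.le)]
            simp
          · have h3 : col.drop a = pre.drop a ++ v :: t := by
              rw [h, List.drop_append_of_le_length (le_of_lt ha)]
            have hdl : (List.drop a pre).length = pre.length - a := by simp
            have e1 : List.take (pre.length + 1 - a) (List.drop a col) = List.drop a pre ++ [v] := by
              rw [h3, List.take_append, List.take_of_length_le (by simp only [List.length_drop]; omega),
                hdl, show pre.length + 1 - a - (pre.length - a) = 1 from by omega]
              simp
            have e2 : List.take (pre.length - a) (List.drop a col) = List.drop a pre := by
              rw [h3, List.take_append, List.take_of_length_le (by simp only [List.length_drop]; omega),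
                hdl, show pre.length - a - (pre.length - a) = 0 from by omega]
              simp
            rw [e1, e2]
        rw [hGo, h2, hF, hext]

-- ---- assembly ----
lemma pvMapEnum {α β : Type} (f : Nat → α) (n : Nat) (g : Int × α → β) :
    (PySem.List.enumerate ((List.range n).map f)).map g
      = (List.range n).map (fun k => g (((k : Nat) : Int), f k)) := by
  apply List.ext_getElem
  · simp [PySem.List.length_enumerate]
  · intro k h1 h2
    simp only [List.getElem_map, PySem.List.getElem_enumerate]
    congr 1
    simp at h1 h2 ⊢

lemma pvAlt_spec (rs : List (List Int)) (max_rank : Int) :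
    create_ranking_paths_alt rs max_rank
      = (((List.range (pvM rs)).map (fun k => pvP max_rank (pvColumn rs max_rank k) 0)).flatten,
         (List.range (pvM rs)).map (fun k =>
           (((k : Nat) : Int),
            (pvSegments (pvColumn rs max_rank k)).map (pvMaterialise (pvColumn rs max_rank k))))) := by
  simp only [create_ranking_paths_alt]
  rw [pvMaxD_eq_pvM]
  have hnodup : ((PySem.List.enumerate ((List.range (pvM rs)).map (pvColumn rs max_rank))).map
      (fun ic => ic.1)).Nodup := by
    rw [PySem.List.map_fst_enumerate]
    exact PySem.List.nodup_pyRange_one _ _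
  have hitems := PySem.Dict.items_foldl_insert_fresh
    (PySem.List.enumerate ((List.range (pvM rs)).map (pvColumn rs max_rank)))
    (fun ic => ic.1)
    (fun ic => (pvSegments ic.2).map (pvMaterialise ic.2))
    PySem.Dict.empty
    (fun a _ => PySem.Dict.contains_empty _)
    hnodup
  simp only [] at hitems
  simp only [Prod.mk.injEq]
  constructor
  · rw [List.flatMap_def, List.map_map]
    congr 1
    apply List.map_congr_left
    intro k hk
    have h := pvPoints_col max_rank (pvColumn rs max_rank k) 0
    simp only [Nat.cast_zero] at h
    exact h
  · rw [hitems]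
    rw [show (PySem.Dict.empty : PySem.Dict Int (List (List Int × List Int))).items = [] from rfl]
    rw [List.nil_append]
    exact pvMapEnum (pvColumn rs max_rank) (pvM rs)
      (fun p => (p.1, (pvSegments p.2).map (pvMaterialise p.2)))

lemma pvA_spec (rs : List (List Int)) (max_rank : Int) :
    create_ranking_paths rs max_rank
      = (((List.range (pvM rs)).map (fun k => pvP max_rank (pvColumn rs max_rank k) 0)).flatten,
         (List.range (pvM rs)).map (fun k =>
           (((k : Nat) : Int),
            pvF max_rank ((pvColumn rs max_rank k).length : Int) (pvColumn rs max_rank k) 0 ([], [])))) := by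
  simp only [create_ranking_paths]
  rw [pvA_dict_spec, pvMkRange_keys]
  rw [show (PySem.Dict.empty : PySem.Dict Int (List (List Int × List Int))) = PySem.Dict.mk [] from rfl]
  rw [pvA_outer max_rank _ (List.range (pvM rs)) [] [] (List.nodup_range)
    (by intro k _ p hp; simp at hp)]
  simp only [List.nil_append, Prod.mk.injEq]
  constructor
  · congr 1
    apply List.map_congr_left
    intro k hk
    rw [pvMkRange_getD, if_pos (List.mem_range.mp hk)]
  · apply List.map_congr_left
    intro k hk
    rw [pvMkRange_getD, if_pos (List.mem_range.mp hk)]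

-- ===== VERDICT (by name: the statement is the Claim_ definition above) =====
theorem create_ranking_paths_spec : Claim_equal_create_ranking_paths := by
  intro rankings max_rank _
  unfold Spec_create_ranking_paths
  rw [pvA_spec, pvAlt_spec]
  simp only [Prod.mk.injEq]
  refine ⟨trivial, ?_⟩
  apply List.map_congr_left
  intro k hk
  have h := (pvCrux max_rank (pvColumn rankings max_rank k) [] (pvColumn rankings max_rank k) rfl).1
  simp only [List.length_nil] at h
  rw [pvSegments_eq_pvG, h]
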